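-- pv_equiv track=rewrite | github.com/pypi-data/pypi-mirror-392 | packages/pmv/pmv-0.2.1-py3-none-any.whl/image_viewer/kitty.py | placeholder_cells
-- ===== SOURCE A (Python) =====
-- def placeholder_cells(image_id: int, rows: int, cols: int) -> str:
--     # Simplified: emit grid with foreground color = image_id mod 256
--     fg = image_id % 256
--     lines = []
--     for r in range(rows):
--         line = []
--         for c in range(cols):
--             line.append(f"\x1b[38;5;{fg}m\U0010EEEE\x1b[39m")
--         lines.append("".join(line))
--     return "\n".join(lines)
-- ===== SOURCE B (Python) =====
-- def _rep(s: str, n: int) -> str: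
--     # divide-and-conquer repetition: O(log n) concatenations by doubling
--     if n <= 0:
--         return ""
--     half = _rep(s, n // 2)
--     return half + half + (s if n % 2 else "")
--
-- def placeholder_cells(image_id: int, rows: int, cols: int) -> str:
--     fg = image_id % 256
--     cell = f"\x1b[38;5;{fg}m\U0010EEEE\x1b[39m"
--     line = _rep(cell, cols)
--     if rows <= 0:
--         return ""
--     return line + _rep("\n" + line, rows - 1)
-- ===== Notes on version B (the rewrite author's own statement) =====
-- stated objective: alternative
-- what changed: B assembles the grid by divide-and-conquer string repetition (exponentiation-by-squaring doubling, O(log n) concatenations) instead of A's cell-by-cell nested appending loops.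
import Mathlib
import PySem

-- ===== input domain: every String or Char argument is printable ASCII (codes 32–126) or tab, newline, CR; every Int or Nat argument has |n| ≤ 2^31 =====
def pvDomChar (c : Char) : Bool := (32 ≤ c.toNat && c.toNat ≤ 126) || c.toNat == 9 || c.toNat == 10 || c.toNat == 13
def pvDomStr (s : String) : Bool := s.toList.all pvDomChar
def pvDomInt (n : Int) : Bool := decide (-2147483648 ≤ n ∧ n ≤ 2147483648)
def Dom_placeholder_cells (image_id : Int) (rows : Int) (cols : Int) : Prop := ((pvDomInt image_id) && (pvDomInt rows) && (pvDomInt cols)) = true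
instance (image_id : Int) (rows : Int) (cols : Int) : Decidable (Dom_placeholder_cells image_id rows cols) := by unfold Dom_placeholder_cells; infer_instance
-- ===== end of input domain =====

-- B assembles the grid by divide-and-conquer string repetition (doubling) instead of A's nested cell-by-cell loops (objective: alternative).

-- ===== PORT A =====
-- the placeholder character U+10EEEE (Lean string literals cannot spell it directly)
def pvPlaceholderChar : String := String.singleton (Char.ofNat 0x10EEEE)

def placeholder_cells (image_id : Int) (rows : Int) (cols : Int) : String :=
  let fg := PySem.Int.mod image_id 256
  let lines := (PySem.List.pyRange 0 rows 1).foldl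
    (fun lines _r =>
      let line := (PySem.List.pyRange 0 cols 1).foldl
        (fun line _c =>
          line ++ ["\x1b[38;5;" ++ PySem.Int.toStr fg ++ "m" ++ pvPlaceholderChar ++ "\x1b[39m"]) []
      lines ++ [PySem.Str.join "" line]) []
  PySem.Str.join "\n" lines

-- ===== PORT B =====
-- _rep from Source B: divide-and-conquer repetition via doubling
def pvRep (s : String) (n : Int) : String :=
  if n ≤ 0 then ""
  else
    let half := pvRep s (PySem.Int.floordiv n 2)
    half ++ half ++ (if PySem.Int.mod n 2 ≠ 0 then s else "")
termination_by n.toNat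
decreasing_by
  rename_i h
  rw [PySem.Int.floordiv_eq_ediv_of_pos (by omega)]
  omega

def placeholder_cells_alt (image_id : Int) (rows : Int) (cols : Int) : String :=
  let fg := PySem.Int.mod image_id 256
  let cell := "\x1b[38;5;" ++ PySem.Int.toStr fg ++ "m" ++ pvPlaceholderChar ++ "\x1b[39m"
  let line := pvRep cell cols
  if rows ≤ 0 then ""
  else line ++ pvRep ("\n" ++ line) (rows - 1)

-- ===== PRECONDITION & SPEC =====
def Spec_placeholder_cells (image_id : Int) (rows : Int) (cols : Int) (out : String) : Prop := out = placeholder_cells_alt image_id rows cols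
instance (image_id : Int) (rows : Int) (cols : Int) (out : String) : Decidable (Spec_placeholder_cells image_id rows cols out) := by unfold Spec_placeholder_cells; infer_instance

-- ===== CLAIM (what is proved, stated in full; the proofs are below) =====
def Claim_equal_placeholder_cells : Prop := ∀ (image_id : Int) (rows : Int) (cols : Int), Dom_placeholder_cells image_id rows cols → Spec_placeholder_cells image_id rows cols (placeholder_cells image_id rows cols)

-- ===== LEMMAS AND PROOFS =====
-- a loop that appends the same element once per iteration builds a replicate of the range's length
theorem pv_foldl_const_append {α β : Type} (l : List β) (x : α) (init : List α) :
    l.foldl (fun acc (_ : β) => acc ++ [x]) init = init ++ List.replicate l.length x := by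
  induction l generalizing init with
  | nil => simp
  | cons b bs ih =>
      rw [List.foldl_cons, ih, List.length_cons, List.append_assoc]
      rw [List.singleton_append, ← List.replicate_succ, List.replicate_succ']

theorem pv_chars_join_nil_replicate (cs : List Char) (k : Nat) :
    PySem.Chars.join [] (List.replicate k cs) = (List.replicate k cs).flatten := by
  induction k with
  | zero => simp [PySem.Chars.join_nil]
  | succ m ih =>
      cases m with
      | zero => simp [PySem.Chars.join_singleton]
      | succ m' =>
          rw [List.replicate_succ, List.replicate_succ (n := m')]
          rw [PySem.Chars.join_cons_cons, ← List.replicate_succ]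
          simp
          simpa using ih

theorem pv_join_empty_replicate (s : String) (k : Nat) :
    (PySem.Str.join "" (List.replicate k s)).toList = List.flatten (List.replicate k s.toList) := by
  rw [PySem.Str.toList_join, List.map_replicate]
  induction k with
  | zero => simp [PySem.Chars.join_nil]
  | succ m ih =>
      cases m with
      | zero => simp [PySem.Chars.join_singleton]
      | succ m' =>
          rw [List.replicate_succ, List.replicate_succ (n := m')]
          rw [PySem.Chars.join_cons_cons, ← List.replicate_succ]
          simp
          simpa using ih

theorem pv_rep_toList (s : String) (n : Int) :
    (pvRep s n).toList = List.flatten (List.replicate n.toNat s.toList) := by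
  generalize hk : n.toNat = k
  induction k using Nat.strong_induction_on generalizing n with
  | _ k ih =>
    rw [pvRep]
    split
    · next h =>
        have : k = 0 := by omega
        simp [this]
    · next h =>
        rw [PySem.Int.floordiv_eq_ediv_of_pos (by omega), PySem.Int.mod_eq_emod_of_pos (by omega)]
        have hlt : (n / 2).toNat < k := by omega
        have ihh := ih _ hlt (n / 2) rfl
        have hk2 : k = (n / 2).toNat + ((n / 2).toNat + (n % 2).toNat) := by omega
        rw [hk2, List.replicate_add, List.replicate_add, List.flatten_append, List.flatten_append]
        rw [String.toList_append, String.toList_append, ihh]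
        have hmod : n % 2 = 0 ∨ n % 2 = 1 := by omega
        rcases hmod with hm | hm <;> simp [hm]

theorem pv_join_newline_replicate (line : String) (k : Nat) :
    (PySem.Str.join "\n" (List.replicate (k+1) line)).toList
      = line.toList ++ List.flatten (List.replicate k ("\n" ++ line).toList) := by
  rw [PySem.Str.toList_join, List.map_replicate]
  induction k with
  | zero => simp [PySem.Chars.join_singleton]
  | succ m ih =>
      rw [List.replicate_succ, List.replicate_succ (n := m)]
      rw [PySem.Chars.join_cons_cons, ← List.replicate_succ, ih]
      rw [List.replicate_succ (n := m), List.flatten_cons]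
      simp [String.toList_append]

-- ===== VERDICT (by name: the statement is the Claim_ definition above) =====
theorem placeholder_cells_spec : Claim_equal_placeholder_cells := by
  intro image_id rows cols _
  show _ = _
  rw [placeholder_cells, placeholder_cells_alt]
  simp only [pv_foldl_const_append, List.nil_append, PySem.List.length_pyRange_one, Int.sub_zero]
  rw [← String.toList_inj]
  by_cases hr : rows ≤ 0
  · have : rows.toNat = 0 := by omega
    simp [hr, this, PySem.Str.toList_join, PySem.Chars.join_nil]
  · have hpos : rows.toNat = (rows.toNat - 1) + 1 := by omega
    simp only [if_neg hr]
    rw [hpos, pv_join_newline_replicate]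
    conv_rhs => rw [String.toList_append]
    rw [pv_rep_toList, pv_rep_toList]
    have h1 : (rows - 1).toNat = rows.toNat - 1 := by omega
    congr 1
    · exact pv_join_empty_replicate _ _
    · rw [h1]
      congr 2
      simp [String.toList_append, pv_rep_toList, pv_chars_join_nil_replicate]
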